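-- pv_equiv track=rewrite | github.com/astrocinco/2c2023-TDA-TP2 | code/solution.py | get_alternative_training
-- ===== SOURCE A (Python) =====
-- def get_alternative_training(effort_list, energy_list):
--     cant_e = len(effort_list)
--
--     first_train = min(effort_list[0], energy_list[0])
--     second_train = max(first_train + min(effort_list[1], energy_list[1]), min(effort_list[1], energy_list[0]))
--     opt = [first_train, second_train]
--
--     for i in range(2, cant_e):
--         a = min(effort_list[i], energy_list[i]) + opt[i-1]
--         b = min(effort_list[i], energy_list[0]) + opt[i-2]
--         opt.append(max(a, b))
--
--     return opt[cant_e - 1]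
-- ===== SOURCE B (Python) =====
-- def _tadd(x, y):
--     # tropical "product": + with None acting as -infinity (absorbing)
--     return None if x is None or y is None else x + y
--
-- def _tmax(x, y):
--     # tropical "sum": max with None acting as -infinity (neutral)
--     if x is None:
--         return y
--     if y is None:
--         return x
--     return max(x, y)
--
-- def _mmul(A, B):
--     # 2x2 max-plus matrix product
--     return ((_tmax(_tadd(A[0][0], B[0][0]), _tadd(A[0][1], B[1][0])),
--              _tmax(_tadd(A[0][0], B[0][1]), _tadd(A[0][1], B[1][1]))),
--             (_tmax(_tadd(A[1][0], B[0][0]), _tadd(A[1][1], B[1][0])),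
--              _tmax(_tadd(A[1][0], B[0][1]), _tadd(A[1][1], B[1][1]))))
--
-- def get_alternative_training(effort_list, energy_list):
--     e0 = energy_list[0]
--     f0 = min(effort_list[0], e0)
--     f1 = max(f0 + min(effort_list[1], energy_list[1]), min(effort_list[1], e0))
--     # state transition (f(i), f(i-1)) = M_i (x) (f(i-1), f(i-2)) in the max-plus semiring
--     P = ((0, None), (None, 0))  # identity
--     for i in range(2, len(effort_list)):
--         M = ((min(effort_list[i], energy_list[i]), min(effort_list[i], e0)), (0, None))
--         P = _mmul(M, P)
--     return _tmax(_tadd(P[0][0], f1), _tadd(P[0][1], f0))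
-- ===== Notes on version B (the rewrite author's own statement) =====
-- stated objective: alternative
-- what changed: B recasts the two-term DP recurrence as a fold multiplying 2x2 max-plus (tropical) matrices, with None as -infinity, and applies the accumulated matrix to the base vector (f1, f0) at the end, instead of A's growing opt table indexed at i-1 and i-2.
import Mathlib
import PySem

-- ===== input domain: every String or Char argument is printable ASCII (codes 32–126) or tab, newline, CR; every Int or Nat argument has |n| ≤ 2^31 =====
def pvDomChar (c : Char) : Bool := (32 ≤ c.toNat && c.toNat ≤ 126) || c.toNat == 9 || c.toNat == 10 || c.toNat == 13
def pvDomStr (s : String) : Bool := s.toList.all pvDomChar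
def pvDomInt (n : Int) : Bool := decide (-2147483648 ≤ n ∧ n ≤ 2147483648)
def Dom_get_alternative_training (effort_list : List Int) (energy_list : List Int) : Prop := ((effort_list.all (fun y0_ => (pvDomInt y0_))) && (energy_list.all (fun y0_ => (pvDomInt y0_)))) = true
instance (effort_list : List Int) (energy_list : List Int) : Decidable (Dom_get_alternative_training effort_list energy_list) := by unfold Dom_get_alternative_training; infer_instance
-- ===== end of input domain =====

-- B recasts the DP recurrence as a fold of 2x2 max-plus (tropical) matrices (None = -infinity) applied to the base vector at the end (objective: alternative).


-- ===== PORT A =====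
def get_alternative_training (effort_list : List Int) (energy_list : List Int) : Int :=
  let cant_e : Int := effort_list.length
  let first_train := min (PySem.List.pyGetD effort_list 0 0) (PySem.List.pyGetD energy_list 0 0)
  let second_train := max (first_train + min (PySem.List.pyGetD effort_list 1 0) (PySem.List.pyGetD energy_list 1 0))
                          (min (PySem.List.pyGetD effort_list 1 0) (PySem.List.pyGetD energy_list 0 0))
  let opt := (PySem.List.pyRange 2 cant_e 1).foldl
    (fun opt i =>
      let a := min (PySem.List.pyGetD effort_list i 0) (PySem.List.pyGetD energy_list i 0) + PySem.List.pyGetD opt (i - 1) 0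
      let b := min (PySem.List.pyGetD effort_list i 0) (PySem.List.pyGetD energy_list 0 0) + PySem.List.pyGetD opt (i - 2) 0
      opt ++ [max a b]) [first_train, second_train]
  PySem.List.pyGetD opt (cant_e - 1) 0

-- ===== PORT B =====
-- tropical "product": + with none as -infinity (absorbing)
def tadd : Option Int → Option Int → Option Int
  | some a, some b => some (a + b)
  | _, _ => none

-- tropical "sum": max with none as -infinity (neutral)
def tmax : Option Int → Option Int → Option Int
  | some a, some b => some (max a b)
  | some a, none => some a
  | none, y => y

-- 2x2 max-plus matrix product (matrix = pair of rows, row = pair of entries)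
def mmul (A B : (Option Int × Option Int) × (Option Int × Option Int)) :
    (Option Int × Option Int) × (Option Int × Option Int) :=
  ((tmax (tadd A.1.1 B.1.1) (tadd A.1.2 B.2.1), tmax (tadd A.1.1 B.1.2) (tadd A.1.2 B.2.2)),
   (tmax (tadd A.2.1 B.1.1) (tadd A.2.2 B.2.1), tmax (tadd A.2.1 B.1.2) (tadd A.2.2 B.2.2)))

-- Python B's final value is always an int on every admitted input; the Option is unwrapped with
-- .getD 0 (exact under Pre_, where that entry is always `some`).
def get_alternative_training_alt (effort_list : List Int) (energy_list : List Int) : Int :=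
  let e0 := PySem.List.pyGetD energy_list 0 0
  let f0 := min (PySem.List.pyGetD effort_list 0 0) e0
  let f1 := max (f0 + min (PySem.List.pyGetD effort_list 1 0) (PySem.List.pyGetD energy_list 1 0))
               (min (PySem.List.pyGetD effort_list 1 0) e0)
  let P := (PySem.List.pyRange 2 (effort_list.length : Int) 1).foldl
    (fun P i =>
      mmul ((some (min (PySem.List.pyGetD effort_list i 0) (PySem.List.pyGetD energy_list i 0)),
             some (min (PySem.List.pyGetD effort_list i 0) e0)),
            (some 0, none)) P)
    ((some 0, none), (none, some 0))
  (tmax (tadd P.1.1 (some f1)) (tadd P.1.2 (some f0))).getD 0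

-- ===== PRECONDITION & SPEC =====
-- Pre_ excludes exactly the inputs where Python A raises IndexError: it needs indices 0 and 1 of
-- effort_list and indices 0..len(effort_list)-1 (and 1) of energy_list.
def Pre_get_alternative_training (effort_list : List Int) (energy_list : List Int) : Prop :=
  2 ≤ effort_list.length ∧ effort_list.length ≤ energy_list.length
instance (effort_list : List Int) (energy_list : List Int) : Decidable (Pre_get_alternative_training effort_list energy_list) := by unfold Pre_get_alternative_training; infer_instance
def pvWitness_get_alternative_training : List Int × List Int := ([1, 2], [3, 4])

def Spec_get_alternative_training (effort_list : List Int) (energy_list : List Int) (out : Int) : Prop := out = get_alternative_training_alt effort_list energy_list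
instance (effort_list : List Int) (energy_list : List Int) (out : Int) : Decidable (Spec_get_alternative_training effort_list energy_list out) := by unfold Spec_get_alternative_training; infer_instance

-- ===== CLAIM (what is proved, stated in full; the proofs are below) =====
def Claim_equal_get_alternative_training : Prop := ∀ (effort_list : List Int) (energy_list : List Int), Dom_get_alternative_training effort_list energy_list → Pre_get_alternative_training effort_list energy_list → Spec_get_alternative_training effort_list energy_list (get_alternative_training effort_list energy_list)

-- ===== LEMMAS AND PROOFS =====

-- proof-side characterisation of the DP value at index i (used to relate both ports)
def altRec (effort_list : List Int) (energy_list : List Int) : Nat → Int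
  | 0 => min (PySem.List.pyGetD effort_list 0 0) (PySem.List.pyGetD energy_list 0 0)
  | 1 => max (altRec effort_list energy_list 0 + min (PySem.List.pyGetD effort_list 1 0) (PySem.List.pyGetD energy_list 1 0))
             (min (PySem.List.pyGetD effort_list 1 0) (PySem.List.pyGetD energy_list 0 0))
  | (i + 2) => max (min (PySem.List.pyGetD effort_list ((i : Int) + 2) 0) (PySem.List.pyGetD energy_list ((i : Int) + 2) 0) + altRec effort_list energy_list (i + 1))
                   (min (PySem.List.pyGetD effort_list ((i : Int) + 2) 0) (PySem.List.pyGetD energy_list 0 0) + altRec effort_list energy_list i)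

-- A's loop invariant: after processing range(2, n) the opt list is exactly [altRec 0, …, altRec (n-1)]
lemma foldl_build (eff en : List Int) (n : Nat) (h2 : 2 ≤ n) :
    (PySem.List.pyRange 2 (n : Int) 1).foldl
      (fun opt i =>
        let a := min (PySem.List.pyGetD eff i 0) (PySem.List.pyGetD en i 0) + PySem.List.pyGetD opt (i - 1) 0
        let b := min (PySem.List.pyGetD eff i 0) (PySem.List.pyGetD en 0 0) + PySem.List.pyGetD opt (i - 2) 0
        opt ++ [max a b])
      [altRec eff en 0, altRec eff en 1]
    = (List.range n).map (altRec eff en) := by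
  induction n with
  | zero => omega
  | succ n ih =>
    rcases Nat.lt_or_ge n 2 with hn | hn
    · interval_cases n
      · omega
      · simp [PySem.List.pyRange_one_eq_nil, List.range_succ]
    · have hsplit : PySem.List.pyRange 2 ((n : Int) + 1) 1
          = PySem.List.pyRange 2 (n : Int) 1 ++ [(n : Int)] := by
        exact PySem.List.pyRange_one_succ_right (by exact_mod_cast hn)
      push_cast
      rw [hsplit, List.foldl_append, ih hn]
      simp only [List.foldl_cons, List.foldl_nil]
      have hg1 : PySem.List.pyGetD ((List.range n).map (altRec eff en)) ((n : Int) - 1) 0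
          = altRec eff en (n - 1) := by
        have : ((n : Int) - 1) = ((n - 1 : Nat) : Int) := by omega
        rw [this, PySem.List.pyGetD_natCast]
        rw [List.getD_eq_getElem?_getD]
        simp [List.getElem?_map, List.getElem?_range (show n - 1 < n by omega)]
      have hg2 : PySem.List.pyGetD ((List.range n).map (altRec eff en)) ((n : Int) - 2) 0
          = altRec eff en (n - 2) := by
        have : ((n : Int) - 2) = ((n - 2 : Nat) : Int) := by omega
        rw [this, PySem.List.pyGetD_natCast]
        rw [List.getD_eq_getElem?_getD]
        simp [List.getElem?_map, List.getElem?_range (show n - 2 < n by omega)]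
      rw [hg1, hg2, List.range_succ, List.map_append]
      simp only [List.map_cons, List.map_nil]
      congr 1
      have hrep : n = (n - 2) + 2 := by omega
      congr 1
      rw [hrep]
      show max _ _ = altRec eff en ((n - 2) + 2)
      rw [altRec]
      have hc : (((n - 2 : Nat) : Int) + 2) = (((n - 2) + 2 : Nat) : Int) := by push_cast; ring
      rw [hc, ← hrep]
      have h1 : (n - 2) + 1 = n - 1 := by omega
      rw [h1]

-- matrix–vector application in the max-plus algebra (proof-side only)
def mv (P : (Option Int × Option Int) × (Option Int × Option Int)) (v : Option Int × Option Int) :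
    Option Int × Option Int :=
  (tmax (tadd P.1.1 v.1) (tadd P.1.2 v.2), tmax (tadd P.2.1 v.1) (tadd P.2.2 v.2))

lemma tadd_assoc (a b c : Option Int) : tadd (tadd a b) c = tadd a (tadd b c) := by
  cases a <;> cases b <;> cases c <;> simp [tadd, add_assoc]

lemma tmax_comm (a b : Option Int) : tmax a b = tmax b a := by
  cases a <;> cases b <;> simp [tmax, max_comm]

lemma tmax_assoc (a b c : Option Int) : tmax (tmax a b) c = tmax a (tmax b c) := by
  cases a <;> cases b <;> cases c <;> simp [tmax, max_assoc]

lemma tmax_left_comm (a b c : Option Int) : tmax a (tmax b c) = tmax b (tmax a c) := by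
  rw [← tmax_assoc, tmax_comm a b, tmax_assoc]

lemma tadd_tmax_left (a b c : Option Int) : tadd a (tmax b c) = tmax (tadd a b) (tadd a c) := by
  cases a <;> cases b <;> cases c <;> simp [tadd, tmax, max_add_add_left]

lemma tadd_tmax_right (a b c : Option Int) : tadd (tmax a b) c = tmax (tadd a c) (tadd b c) := by
  cases a <;> cases b <;> cases c <;> simp [tadd, tmax, max_add_add_right]

-- associativity of the max-plus action: (M ⊗ P) v = M (P v)
lemma mv_mmul (M P : (Option Int × Option Int) × (Option Int × Option Int))
    (v : Option Int × Option Int) : mv (mmul M P) v = mv M (mv P v) := by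
  simp only [mv, mmul, tadd_tmax_left, tadd_tmax_right, tadd_assoc]
  refine Prod.ext ?_ ?_ <;>
    · show tmax (tmax _ _) (tmax _ _) = tmax (tmax _ _) (tmax _ _)
      rw [tmax_assoc, tmax_assoc]
      congr 1
      rw [tmax_left_comm]

-- B's fold invariant: the accumulated matrix applied to the base vector gives (altRec (n-1), altRec (n-2))
lemma mat_fold (eff en : List Int) (n : Nat) (h2 : 2 ≤ n) :
    mv ((PySem.List.pyRange 2 (n : Int) 1).foldl
      (fun P i =>
        mmul ((some (min (PySem.List.pyGetD eff i 0) (PySem.List.pyGetD en i 0)),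
               some (min (PySem.List.pyGetD eff i 0) (PySem.List.pyGetD en 0 0))),
              (some 0, none)) P)
      ((some 0, none), (none, some 0)))
      (some (altRec eff en 1), some (altRec eff en 0))
    = (some (altRec eff en (n - 1)), some (altRec eff en (n - 2))) := by
  induction n with
  | zero => omega
  | succ n ih =>
    rcases Nat.lt_or_ge n 2 with hn | hn
    · interval_cases n
      · omega
      · simp [PySem.List.pyRange_one_eq_nil, mv, tadd, tmax]
    · have hsplit : PySem.List.pyRange 2 ((n : Int) + 1) 1
          = PySem.List.pyRange 2 (n : Int) 1 ++ [(n : Int)] := by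
        exact PySem.List.pyRange_one_succ_right (by exact_mod_cast hn)
      push_cast
      rw [hsplit, List.foldl_append]
      simp only [List.foldl_cons, List.foldl_nil]
      rw [mv_mmul, ih hn]
      have hstep : altRec eff en n =
          max (min (PySem.List.pyGetD eff (n : Int) 0) (PySem.List.pyGetD en (n : Int) 0) + altRec eff en (n - 1))
              (min (PySem.List.pyGetD eff (n : Int) 0) (PySem.List.pyGetD en 0 0) + altRec eff en (n - 2)) := by
        have hrep : n = (n - 2) + 2 := by omega
        rw [hrep]
        rw [altRec]
        have hc : (((n - 2 : Nat) : Int) + 2) = ((n : Nat) : Int) := by omega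
        rw [hc, ← hrep]
        have h1 : (n - 2) + 1 = n - 1 := by omega
        rw [h1]
      simp only [mv, tadd, tmax]
      refine Prod.ext ?_ ?_
      · simpa using hstep.symm
      · simp

-- ===== VERDICT (by name: the statement is the Claim_ definition above) =====
theorem get_alternative_training_spec : Claim_equal_get_alternative_training := by
  intro eff en _hdom hpre
  obtain ⟨h2, hle⟩ := hpre
  show get_alternative_training eff en = get_alternative_training_alt eff en
  unfold get_alternative_training get_alternative_training_alt
  simp only []
  have hfs : [min (PySem.List.pyGetD eff 0 0) (PySem.List.pyGetD en 0 0),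
      max (min (PySem.List.pyGetD eff 0 0) (PySem.List.pyGetD en 0 0) + min (PySem.List.pyGetD eff 1 0) (PySem.List.pyGetD en 1 0))
          (min (PySem.List.pyGetD eff 1 0) (PySem.List.pyGetD en 0 0))]
      = [altRec eff en 0, altRec eff en 1] := by
    simp [altRec]
  rw [hfs, foldl_build eff en eff.length h2]
  have hA : PySem.List.pyGetD ((List.range eff.length).map (altRec eff en)) ((eff.length : Int) - 1) 0
      = altRec eff en (eff.length - 1) := by
    have : ((eff.length : Int) - 1) = ((eff.length - 1 : Nat) : Int) := by omega
    rw [this, PySem.List.pyGetD_natCast, List.getD_eq_getElem?_getD]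
    simp [List.getElem?_map, List.getElem?_range (show eff.length - 1 < eff.length by omega)]
  rw [hA]
  -- B side: read the result off mat_fold
  have hmf := mat_fold eff en eff.length h2
  have hB : tmax (tadd ((PySem.List.pyRange 2 (eff.length : Int) 1).foldl
      (fun P i =>
        mmul ((some (min (PySem.List.pyGetD eff i 0) (PySem.List.pyGetD en i 0)),
               some (min (PySem.List.pyGetD eff i 0) (PySem.List.pyGetD en 0 0))),
              (some 0, none)) P)
      ((some 0, none), (none, some 0))).1.1 (some (altRec eff en 1)))
      (tadd ((PySem.List.pyRange 2 (eff.length : Int) 1).foldl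
      (fun P i =>
        mmul ((some (min (PySem.List.pyGetD eff i 0) (PySem.List.pyGetD en i 0)),
               some (min (PySem.List.pyGetD eff i 0) (PySem.List.pyGetD en 0 0))),
              (some 0, none)) P)
      ((some 0, none), (none, some 0))).1.2 (some (altRec eff en 0)))
      = some (altRec eff en (eff.length - 1)) := congrArg Prod.fst hmf
  have hfs0 : min (PySem.List.pyGetD eff 0 0) (PySem.List.pyGetD en 0 0) = altRec eff en 0 := by
    simp [altRec]
  have hfs1 : max (min (PySem.List.pyGetD eff 0 0) (PySem.List.pyGetD en 0 0) + min (PySem.List.pyGetD eff 1 0) (PySem.List.pyGetD en 1 0))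
      (min (PySem.List.pyGetD eff 1 0) (PySem.List.pyGetD en 0 0)) = altRec eff en 1 := by
    simp [altRec]
  rw [hfs1, hfs0, hB]
  rfl
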